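-- pv_equiv track=rewrite | github.com/Domiko7/competitive-programming | practice/logia/L16/etap_2/3.py | generate_array
-- ===== SOURCE A (Python) =====
-- def generate_array(n, zabudowane):
--     arr = []
--     zabudowane = set(zabudowane)
--     for i in range(1, (n * n) + 1):
--         if (i - 1) % n == 0:
--             arr.append([])
--         if i not in zabudowane:
--             arr[-1].append((".", i))
--         else:
--             arr[-1].append(("X", i))
--     return arr
-- ===== SOURCE B (Python) =====
-- def generate_array(n, zabudowane):
--     arr = [[(".", r * n + c + 1) for c in range(n)] for r in range(n)]
--     for z in zabudowane:
--         if 1 <= z <= n * n: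
--             r, c = divmod(z - 1, n)
--             arr[r][c] = ("X", z)
--     return arr
-- ===== Notes on version B (the rewrite author's own statement) =====
-- stated objective: alternative
-- what changed: B first builds the full all-dot grid by comprehension, then overwrites only the built cells by computing each id's (row,col) with divmod and assigning in place, instead of A's single flat pass over 1..n*n that tests set membership per cell and grows rows on a modular condition.
-- outside the precondition, e.g. on generate_array(-1, []): A returns [[('.', 1)]], B returns []
import Mathlib
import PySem

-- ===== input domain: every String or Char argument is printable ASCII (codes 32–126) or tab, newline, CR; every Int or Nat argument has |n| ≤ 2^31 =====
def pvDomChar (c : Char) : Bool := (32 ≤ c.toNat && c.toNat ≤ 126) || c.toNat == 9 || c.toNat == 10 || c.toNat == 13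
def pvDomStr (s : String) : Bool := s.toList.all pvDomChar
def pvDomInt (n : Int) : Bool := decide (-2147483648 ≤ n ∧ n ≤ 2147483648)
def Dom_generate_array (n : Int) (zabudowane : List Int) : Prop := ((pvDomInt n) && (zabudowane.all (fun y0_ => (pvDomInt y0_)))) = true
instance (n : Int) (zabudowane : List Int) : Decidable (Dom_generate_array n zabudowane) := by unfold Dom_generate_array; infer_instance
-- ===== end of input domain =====

-- B builds the all-dot grid first and then overwrites only the built cells, locating each
-- id by divmod, instead of A's flat membership-testing pass; return values agree on 0 ≤ n.

-- ===== PORT A =====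
-- arr[-1].append(x): append x to the last row; [] is unreachable in A
-- (the first loop iteration always appends a row before arr[-1] is touched).
def pvAppendLast : List (List (String × Int)) → (String × Int) → List (List (String × Int))
  | [], _ => []
  | [r], x => [r ++ [x]]
  | r :: s :: rest, x => r :: pvAppendLast (s :: rest) x

-- the body of A's loop over i
def pvStepA (zb : PySem.Set Int) (n : Int) (arr : List (List (String × Int))) (i : Int) :
    List (List (String × Int)) :=
  let arr := if PySem.Int.mod (i - 1) n = 0 then arr ++ [([] : List (String × Int))] else arr
  if PySem.Set.contains zb i = false then pvAppendLast arr (".", i) else pvAppendLast arr ("X", i)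

def generate_array (n : Int) (zabudowane : List Int) : List (List (String × Int)) :=
  let zb := PySem.Set.ofList zabudowane
  (PySem.List.pyRange 1 (n * n + 1) 1).foldl (pvStepA zb n) []

-- ===== PORT B =====
-- the all-dot grid: [[(".", r*n+c+1) for c in range(n)] for r in range(n)]
def pvDotGrid (n : Int) : List (List (String × Int)) :=
  (PySem.List.pyRange 0 n 1).map (fun r =>
    (PySem.List.pyRange 0 n 1).map (fun c => (("." : String), r * n + c + 1)))

-- the body of B's loop: if 1 <= z <= n*n, overwrite cell divmod(z-1, n) with ("X", z)
-- (the guard makes both divmod indices in range, so List.modify/List.set are exact)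
def pvMark (n : Int) (arr : List (List (String × Int))) (z : Int) :
    List (List (String × Int)) :=
  if 1 ≤ z ∧ z ≤ n * n then
    let r := PySem.Int.floordiv (z - 1) n
    let c := PySem.Int.mod (z - 1) n
    arr.modify r.toNat (fun row => row.set c.toNat (("X" : String), z))
  else arr

def generate_array_alt (n : Int) (zabudowane : List Int) : List (List (String × Int)) :=
  zabudowane.foldl (pvMark n) (pvDotGrid n)

-- ===== PRECONDITION & SPEC =====
-- Pre_ excludes negative n, a corner no caller of a grid builder would specify: there A's
-- |n|×|n| grid and B's empty grid are both defensible readings of a negative grid size.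
def Pre_generate_array (n : Int) (zabudowane : List Int) : Prop := 0 ≤ n
instance (n : Int) (zabudowane : List Int) : Decidable (Pre_generate_array n zabudowane) := by
  unfold Pre_generate_array; infer_instance

def pvWitness_generate_array : Int × List Int := (3, [2, 5])

def Spec_generate_array (n : Int) (zabudowane : List Int) (out : List (List (String × Int))) : Prop := out = generate_array_alt n zabudowane
instance (n : Int) (zabudowane : List Int) (out : List (List (String × Int))) : Decidable (Spec_generate_array n zabudowane out) := by unfold Spec_generate_array; infer_instance

-- ===== CLAIM (what is proved, stated in full; the proofs are below) =====
def Claim_equal_generate_array : Prop := ∀ (n : Int) (zabudowane : List Int), Dom_generate_array n zabudowane → Pre_generate_array n zabudowane → Spec_generate_array n zabudowane (generate_array n zabudowane)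

-- ===== LEMMAS AND PROOFS =====

-- the grid whose cell at flat index i is "X" exactly when p i
def pvCell (p : Int → Bool) (i : Int) : String × Int :=
  if p i then ("X", i) else (".", i)

def pvGrid (n : Int) (p : Int → Bool) : List (List (String × Int)) :=
  (PySem.List.pyRange 0 n 1).map (fun r =>
    (PySem.List.pyRange 0 n 1).map (fun c => pvCell p (r * n + c + 1)))

lemma pvGrid_congr (n : Int) (p q : Int → Bool)
    (h : ∀ i, 1 ≤ i → i ≤ n * n → p i = q i) : pvGrid n p = pvGrid n q := by
  unfold pvGrid
  apply List.map_congr_left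
  intro r hr
  apply List.map_congr_left
  intro c hc
  rw [PySem.List.mem_pyRange_one] at hr hc
  have h1 : 1 ≤ r * n + c + 1 := by nlinarith [hr.1, hc.1]
  have h2 : r * n + c + 1 ≤ n * n := by nlinarith [hr.2, hc.2, hr.1, hc.1]
  unfold pvCell
  rw [h _ h1 h2]

lemma pvDotGrid_eq (n : Int) : pvDotGrid n = pvGrid n (fun _ => false) := by
  simp [pvDotGrid, pvGrid, pvCell]

-- uniqueness of the (row, col) decomposition of a flat index
lemma pvIdxInj (n i i' j j' : Int) (hn : 0 < n) (hj : 0 ≤ j) (hjn : j < n)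
    (hj' : 0 ≤ j') (hjn' : j' < n) (h : i * n + j = i' * n + j') : i = i' ∧ j = j' := by
  have hi : i = (i * n + j) / n := by
    rw [add_comm, Int.add_mul_ediv_right _ _ (by omega : n ≠ 0),
      Int.ediv_eq_zero_of_lt hj hjn]; omega
  have hi' : i' = (i' * n + j') / n := by
    rw [add_comm, Int.add_mul_ediv_right _ _ (by omega : n ≠ 0),
      Int.ediv_eq_zero_of_lt hj' hjn']; omega
  have : i = i' := by rw [hi, hi', h]
  constructor
  · exact this
  · nlinarith [h, this]

-- B's loop body turns the grid of p into the grid of p ∨ (· = z)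
lemma pvMark_grid (n z : Int) (hn : 0 ≤ n) (p : Int → Bool) :
    pvMark n (pvGrid n p) z = pvGrid n (fun i => p i || i == z) := by
  unfold pvMark
  by_cases hz : 1 ≤ z ∧ z ≤ n * n
  · rw [if_pos hz]
    have hn1 : 0 < n := by nlinarith [hz.1, hz.2]
    have hfd : PySem.Int.floordiv (z - 1) n = (z - 1) / n :=
      PySem.Int.floordiv_eq_ediv_of_pos hn1
    have hmd : PySem.Int.mod (z - 1) n = (z - 1) % n :=
      PySem.Int.mod_eq_emod_of_pos hn1
    set r0 : Int := (z - 1) / n with hr0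
    set c0 : Int := (z - 1) % n with hc0
    have hr0nn : 0 ≤ r0 := Int.ediv_nonneg (by omega) (by omega)
    have hc0nn : 0 ≤ c0 := Int.emod_nonneg _ (by omega)
    have hc0lt : c0 < n := Int.emod_lt_of_pos _ hn1
    have hsplit : r0 * n + c0 = z - 1 := by
      rw [hr0, hc0, mul_comm]; exact Int.ediv_add_emod (z - 1) n
    have hr0lt : r0 < n := by nlinarith
    simp only [hfd, hmd]
    unfold pvGrid
    apply List.ext_getElem
    · simp
    intro i h1 h2
    simp only [List.getElem_modify, List.getElem_map, PySem.List.getElem_pyRange_one]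
    have hlen : (PySem.List.pyRange 0 n 1).length = n.toNat := by
      rw [PySem.List.length_pyRange_one]; omega
    rw [List.length_map, hlen] at h2
    have hival : (0 : Int) + (i : Int) = (i : Int) := by omega
    rw [hival]
    by_cases hri : r0.toNat = i
    · rw [if_pos hri]
      apply List.ext_getElem
      · simp
      intro j j1 j2
      simp only [List.getElem_set, List.getElem_map, PySem.List.getElem_pyRange_one]
      rw [List.length_map, hlen] at j2
      have hieq : (i : Int) = r0 := by omega
      by_cases hcj : c0.toNat = j
      · rw [if_pos hcj]
        have hjeq : (j : Int) = c0 := by omega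
        have hidx : (i : Int) * n + (j : Int) + 1 = z := by rw [hieq, hjeq]; omega
        simp [pvCell, hidx]
      · rw [if_neg hcj]
        have hne : (i : Int) * n + (j : Int) + 1 ≠ z := by
          intro hcon
          have : (i : Int) * n + (j : Int) = r0 * n + c0 := by omega
          have := pvIdxInj n (i : Int) r0 (j : Int) c0 hn1 (by omega) (by omega)
            hc0nn hc0lt this
          omega
        simp [pvCell, hne]
    · rw [if_neg hri]
      apply List.map_congr_left
      intro c hc
      rw [PySem.List.mem_pyRange_one] at hc
      have hne : (i : Int) * n + c + 1 ≠ z := by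
        intro hcon
        have : (i : Int) * n + c = r0 * n + c0 := by omega
        have := pvIdxInj n (i : Int) r0 c c0 hn1 hc.1 hc.2 hc0nn hc0lt this
        omega
      simp [pvCell, hne]
  · rw [if_neg hz]
    apply pvGrid_congr
    intro i hi1 hi2
    have : (i == z) = false := by
      simp only [beq_eq_false_iff_ne, ne_eq]
      intro h; subst h; exact hz ⟨hi1, hi2⟩
    rw [this, Bool.or_false]

-- B's whole update loop on a grid of p yields the grid of p ∨ membership
lemma pvFoldMark (n : Int) (hn : 0 ≤ n) (zs : List Int) :
    ∀ p : Int → Bool, zs.foldl (pvMark n) (pvGrid n p)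
      = pvGrid n (fun i => p i || zs.contains i) := by
  induction zs with
  | nil => intro p; simp [pvGrid]
  | cons z zs ih =>
    intro p
    rw [List.foldl_cons, pvMark_grid n z hn p, ih]
    have : (fun i => (p i || i == z) || zs.contains i)
        = (fun i => p i || (z :: zs).contains i) := by
      funext i
      simp only [List.contains_cons]
      rw [Bool.or_assoc]
    rw [this]

-- ---- A side: A's flat loop builds the same grid, one row per block of n indices ----

-- the cell A produces at index i (branch order as in A)
def pvCellA (zb : PySem.Set Int) (i : Int) : String × Int :=
  if PySem.Set.contains zb i = false then (".", i) else ("X", i)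

-- the row A's loop produces for block r: indices r*n+1 .. r*n+n
def pvRowA (zb : PySem.Set Int) (n r : Int) : List (String × Int) :=
  (PySem.List.pyRange (r * n + 1) (r * n + n + 1) 1).map (pvCellA zb)

lemma pvAppendLast_eq (arr : List (List (String × Int))) (cur : List (String × Int))
    (x : String × Int) : pvAppendLast (arr ++ [cur]) x = arr ++ [cur ++ [x]] := by
  induction arr with
  | nil => rfl
  | cons a as ih =>
    cases as with
    | nil => rfl
    | cons b bs => simpa [pvAppendLast] using ih

lemma pvStepA_no_new (zb : PySem.Set Int) (n i : Int) (h : PySem.Int.mod (i - 1) n ≠ 0)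
    (arr : List (List (String × Int))) (cur : List (String × Int)) :
    pvStepA zb n (arr ++ [cur]) i = arr ++ [cur ++ [pvCellA zb i]] := by
  unfold pvStepA pvCellA
  rw [if_neg h]
  by_cases hc : PySem.Set.contains zb i = false
  · rw [if_pos hc, if_pos hc, pvAppendLast_eq]
  · rw [if_neg hc, if_neg hc, pvAppendLast_eq]

lemma pvFoldA_block (zb : PySem.Set Int) (n : Int) (is : List Int)
    (h : ∀ i ∈ is, PySem.Int.mod (i - 1) n ≠ 0) :
    ∀ (arr : List (List (String × Int))) (cur : List (String × Int)),
      is.foldl (pvStepA zb n) (arr ++ [cur]) = arr ++ [cur ++ is.map (pvCellA zb)] := by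
  induction is with
  | nil => intro arr cur; simp
  | cons i is ih =>
    intro arr cur
    have hi := h i (by simp)
    have hrest : ∀ j ∈ is, PySem.Int.mod (j - 1) n ≠ 0 := fun j hj => h j (by simp [hj])
    simp only [List.foldl_cons, pvStepA_no_new zb n i hi arr cur, ih hrest, List.map_cons,
      List.append_assoc, List.singleton_append]

lemma pvModRow (n r : Int) : PySem.Int.mod (r * n + 1 - 1) n = 0 := by
  rw [show r * n + 1 - 1 = r * n by ring, PySem.Int.mod_eq_zero_iff_dvd]
  exact ⟨r, mul_comm r n⟩

lemma pvModMid (n r i : Int) (_hn : 1 ≤ n) (h1 : r * n + 2 ≤ i) (h2 : i < r * n + n + 1) :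
    PySem.Int.mod (i - 1) n ≠ 0 := by
  intro hmod
  rw [PySem.Int.mod_eq_zero_iff_dvd] at hmod
  have hdvd := hmod
  have hd : n ∣ (i - 1 - r * n) := (Dvd.dvd.sub hdvd ⟨r, mul_comm r n⟩)
  have hpos : 0 < i - 1 - r * n := by omega
  have := Int.le_of_dvd hpos hd
  omega

-- one block of n consecutive indices of A's loop produces exactly one new row
lemma pvFoldA_row (zb : PySem.Set Int) (n r : Int) (hn : 1 ≤ n)
    (arr : List (List (String × Int))) :
    (PySem.List.pyRange (r * n + 1) (r * n + n + 1) 1).foldl (pvStepA zb n) arr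
      = arr ++ [pvRowA zb n r] := by
  unfold pvRowA
  rw [PySem.List.pyRange_one_cons (by omega)]
  have hstep1 : pvStepA zb n arr (r * n + 1) = arr ++ [[pvCellA zb (r * n + 1)]] := by
    unfold pvStepA pvCellA
    rw [if_pos (pvModRow n r)]
    by_cases hc : PySem.Set.contains zb (r * n + 1) = false
    · rw [if_pos hc, if_pos hc, pvAppendLast_eq]; rfl
    · rw [if_neg hc, if_neg hc, pvAppendLast_eq]; rfl
  have hmid : ∀ i ∈ PySem.List.pyRange (r * n + 1 + 1) (r * n + n + 1) 1,
      PySem.Int.mod (i - 1) n ≠ 0 := by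
    intro i hi
    rw [PySem.List.mem_pyRange_one] at hi
    exact pvModMid n r i hn (by omega) (by omega)
  simp only [List.foldl_cons, hstep1, List.map_cons,
    pvFoldA_block zb n _ hmid arr [pvCellA zb (r * n + 1)]]
  simp

-- main induction: the first r blocks of A's loop build the first r rows
lemma pvMain (zb : PySem.Set Int) (n : Int) (hn : 1 ≤ n) (r : Nat) :
    (PySem.List.pyRange 1 ((r : Int) * n + 1) 1).foldl (pvStepA zb n) []
      = (PySem.List.pyRange 0 (r : Int) 1).map (pvRowA zb n) := by
  induction r with
  | zero => simp [PySem.List.pyRange_one_eq_nil]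
  | succ r ih =>
    have hsplit : PySem.List.pyRange 1 (((r : Int) + 1) * n + 1) 1
        = PySem.List.pyRange 1 ((r : Int) * n + 1) 1
          ++ PySem.List.pyRange ((r : Int) * n + 1) ((r : Int) * n + n + 1) 1 := by
      have h1 : (1 : Int) ≤ (r : Int) * n + 1 := by
        have : (0 : Int) ≤ (r : Int) * n := mul_nonneg (by positivity) (by omega)
        omega
      rw [show ((r : Int) + 1) * n + 1 = (r : Int) * n + n + 1 by ring]
      exact PySem.List.pyRange_one_append 1 ((r : Int) * n + 1) ((r : Int) * n + n + 1)
        h1 (by omega)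
    push_cast
    rw [hsplit, List.foldl_append, ih, pvFoldA_row zb n (r : Int) hn,
      PySem.List.pyRange_one_succ_right (by positivity), List.map_append, List.map_singleton]

-- A's row r is row r of the membership grid
lemma pvRowA_eq (zb : PySem.Set Int) (n r : Int) :
    pvRowA zb n r
      = (PySem.List.pyRange 0 n 1).map
          (fun c => pvCell (fun i => PySem.Set.contains zb i) (r * n + c + 1)) := by
  unfold pvRowA
  rw [PySem.List.pyRange_one 0 n, PySem.List.pyRange_one (r * n + 1) (r * n + n + 1)]
  simp only [List.map_map]
  have hlen : (r * n + n + 1 - (r * n + 1)).toNat = (n - 0).toNat := by omega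
  rw [hlen]
  apply List.map_congr_left
  intro k _
  simp only [Function.comp_apply]
  have harg : r * n + 1 + (k : Int) = r * n + ((0 : Int) + (k : Int)) + 1 := by ring
  rw [harg]
  cases hb : PySem.Set.contains zb (r * n + ((0 : Int) + (k : Int)) + 1) <;>
    simp [pvCellA, pvCell, hb]

-- set membership is list membership
lemma pvContains_ofList (l : List Int) (i : Int) :
    PySem.Set.contains (PySem.Set.ofList l) i = l.contains i := by
  simp [PySem.Set.contains]

-- ===== VERDICT (by name: the statement is the Claim_ definition above) =====
theorem generate_array_spec : Claim_equal_generate_array := by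
  intro n zabudowane _ hpre
  unfold Spec_generate_array generate_array generate_array_alt
  rw [pvDotGrid_eq, pvFoldMark n hpre zabudowane]
  by_cases hn : n = 0
  · subst hn
    simp [PySem.List.pyRange_one_eq_nil, pvGrid]
  · have hn1 : 1 ≤ n := by
      have : (0 : Int) ≤ n := hpre
      omega
    have hcast : ((n.toNat : Int)) = n := Int.toNat_of_nonneg hpre
    have hmain := pvMain (PySem.Set.ofList zabudowane) n hn1 n.toNat
    rw [hcast] at hmain
    rw [hmain]
    unfold pvGrid
    apply List.map_congr_left
    intro r _
    rw [pvRowA_eq]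
    apply List.map_congr_left
    intro c _
    simp only [pvCell, pvContains_ofList, Bool.false_or]
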